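-- pv_equiv track=rewrite | github.com/hwanginbeom/algorithm_study | WeeklyChallenge/WeeklyChallenge04_sunlim.py | solution
-- ===== SOURCE A (Python) =====
-- def solution(table, languages, preference):
--     answer = []   #여기에 값넣어야해
--     new_table = sorted([list(t.split()) for t in table], key=lambda x : x[0])
--     job = {n: new_table[n][0] for n in range(len(new_table))}
--
--     for j in range(len(job)):    #for구문 중요!! 혼자 만들수 있는 스킬늘리기!!!!
--         total = 0
--         for lang, pref in zip(languages, preference):
--             if lang in new_table[j]:
--                 total += (6 - new_table[j].index(lang)) * pref
--         answer.append(total)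
--
--     return job[answer.index(max(answer))]
-- ===== SOURCE B (Python) =====
-- def solution(table, languages, preference):
--     # accumulate weights once (duplicates in `languages` add up, matching A's double count)
--     weight = {}
--     for lang, pref in zip(languages, preference):
--         weight[lang] = weight.get(lang, 0) + pref
--
--     def score(row):
--         total = 0
--         seen = set()
--         for i, tok in enumerate(row):
--             if tok not in seen:
--                 seen.add(tok)
--                 total += (6 - i) * weight.get(tok, 0)
--         return total
--
--     # single pass, no sort: keep the (score, name) best under "higher score, then smaller name"
--     best_score = None
--     best_name = None
--     for t in table:
--         row = t.split()
--         s = score(row)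
--         name = row[0]
--         if best_score is None or s > best_score or (s == best_score and name < best_name):
--             best_score, best_name = s, name
--     return best_name
-- ===== Notes on version B (the rewrite author's own statement) =====
-- stated objective: faster
-- what changed: B drops A's sort and parallel answer-list entirely: it precomputes an accumulated weight map over the (language, preference) pairs, scores each row in one pass over the row's own tokens (seen-set skips repeats) instead of scanning the row per language with `in` and `.index`, and selects the winner in a single pass with a running (best_score, best_name) pair under 'higher score, else smaller name' — which equals A's sort-then-first-argmax.
import Mathlib
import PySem

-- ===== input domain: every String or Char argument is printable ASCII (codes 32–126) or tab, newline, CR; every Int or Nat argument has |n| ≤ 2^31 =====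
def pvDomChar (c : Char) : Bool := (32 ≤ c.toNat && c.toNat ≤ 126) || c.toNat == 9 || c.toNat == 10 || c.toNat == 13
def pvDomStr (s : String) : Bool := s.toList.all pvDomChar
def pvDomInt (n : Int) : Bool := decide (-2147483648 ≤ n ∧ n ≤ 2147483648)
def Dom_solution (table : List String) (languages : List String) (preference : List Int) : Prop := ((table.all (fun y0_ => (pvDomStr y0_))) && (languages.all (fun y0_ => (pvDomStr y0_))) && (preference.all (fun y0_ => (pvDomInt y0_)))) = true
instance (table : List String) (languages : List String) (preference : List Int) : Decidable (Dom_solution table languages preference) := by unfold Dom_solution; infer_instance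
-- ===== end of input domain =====

-- B drops A's sort and answer list: accumulated weight map, one pass over each row's tokens with a
-- seen-set, and a single-pass running best under "higher score, else smaller name" (objective: faster,
-- measured).

-- ===== PORT A =====
-- A's inner loop: total += (6 - new_table[j].index(lang)) * pref when lang in new_table[j]
def solScoreA (row : List String) (languages : List String) (preference : List Int) : Int :=
  (languages.zip preference).foldl
    (fun total lp =>
      if lp.1 ∈ row then
        total + (6 - (((PySem.List.index? row lp.1).getD 0 : Nat) : Int)) * lp.2
      else total) 0

def solution (table : List String) (languages : List String) (preference : List Int) : String :=
  let new_table := PySem.List.sorted (table.map (fun t => PySem.Str.split₀ t))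
      (fun x => PySem.List.pyGetD x 0 "") false
  let job : PySem.Dict Int String :=
    ((PySem.List.pyRange 0 (new_table.length : Int) 1).map
        (fun n => (n, PySem.List.pyGetD (PySem.List.pyGetD new_table n []) 0 ""))).foldl
      (fun d p => d.insert p.1 p.2) PySem.Dict.empty
  let answer := (PySem.List.pyRange 0 (new_table.length : Int) 1).map
      (fun j => solScoreA (PySem.List.pyGetD new_table j []) languages preference)
  job.getD
    (((PySem.List.index? answer ((PySem.List.max? answer (fun x => x)).getD 0)).getD 0 : Nat) : Int)
    ""

-- ===== PORT B =====
-- weight[lang] = weight.get(lang, 0) + pref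
def solWeight (languages : List String) (preference : List Int) : PySem.Dict String Int :=
  (languages.zip preference).foldl
    (fun d lp => d.insert lp.1 (d.getD lp.1 0 + lp.2)) PySem.Dict.empty

-- for i, tok in enumerate(row): if tok not in seen: seen.add(tok); total += (6 - i) * weight.get(tok, 0)
def solScoreB (w : PySem.Dict String Int) (row : List String) : Int :=
  ((PySem.List.enumerate row).foldl
    (fun st p =>
      if PySem.Set.contains st.2 p.2 then st
      else (st.1 + (6 - p.1) * w.getD p.2 0, PySem.Set.add st.2 p.2))
    ((0 : Int), (PySem.Set.empty : PySem.Set String))).1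

def solution_alt (table : List String) (languages : List String) (preference : List Int) : String :=
  let w := solWeight languages preference
  let best := table.foldl
    (fun best t =>
      let row := PySem.Str.split₀ t
      let s := solScoreB w row
      let name := PySem.List.pyGetD row 0 ""
      match best with
      | none => some (s, name)
      | some b => if b.1 < s ∨ (s = b.1 ∧ name < b.2) then some (s, name) else some b)
    (none : Option (Int × String))
  (best.map Prod.snd).getD ""

-- ===== PRECONDITION & SPEC =====
-- Pre_ excludes exactly the inputs where Python A raises: an empty table (max() of the empty
-- answer list, ValueError) and a whitespace-only table entry, whose split() is [] (x[0], IndexError).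
def Pre_solution (table : List String) (languages : List String) (preference : List Int) : Prop :=
  table ≠ [] ∧ ∀ t ∈ table, PySem.Str.split₀ t ≠ []
instance (table : List String) (languages : List String) (preference : List Int) : Decidable (Pre_solution table languages preference) := by unfold Pre_solution; infer_instance

def pvWitness_solution : List String × List String × List Int :=
  (["java backend junior pizza 150", "python frontend senior chicken 210", "c vim"],
   ["python", "c", "java"], [7, 5, 5])

def Spec_solution (table : List String) (languages : List String) (preference : List Int) (out : String) : Prop := out = solution_alt table languages preference
instance (table : List String) (languages : List String) (preference : List Int) (out : String) : Decidable (Spec_solution table languages preference out) := by unfold Spec_solution; infer_instance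

-- ===== CLAIM (what is proved, stated in full; the proofs are below) =====
def Claim_equal_solution : Prop := ∀ (table : List String) (languages : List String) (preference : List Int), Dom_solution table languages preference → Pre_solution table languages preference → Spec_solution table languages preference (solution table languages preference)

-- ===== LEMMAS AND PROOFS =====

-- the score fold's total is affine in the starting total
theorem scoreB_fold_shift (w : PySem.Dict String Int) :
    ∀ (row : List String) (s t c : Int) (S : PySem.Set String),
    ((PySem.List.enumerate row s).foldl
        (fun st p =>
          if PySem.Set.contains st.2 p.2 then st
          else (st.1 + (6 - p.1) * w.getD p.2 0, PySem.Set.add st.2 p.2))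
        (t + c, S)).1
      = ((PySem.List.enumerate row s).foldl
          (fun st p =>
            if PySem.Set.contains st.2 p.2 then st
            else (st.1 + (6 - p.1) * w.getD p.2 0, PySem.Set.add st.2 p.2))
          (t, S)).1 + c := by
  intro row
  induction row with
  | nil => intro s t c S; simp [PySem.List.enumerate_nil]
  | cons x r ih =>
    intro s t c S
    rw [PySem.List.enumerate_cons]
    simp only [List.foldl_cons]
    by_cases hx : PySem.Set.contains S x = true
    · rw [if_pos hx, if_pos hx]; exact ih (s+1) t c S
    · rw [if_neg hx, if_neg hx]
      have hre : t + c + (6 - s) * w.getD x 0 = (t + (6 - s) * w.getD x 0) + c := by ring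
      rw [hre]
      exact ih (s+1) _ c _

theorem scoreB_fold_insert_add (w : PySem.Dict String Int) (k : String) (pref : Int) :
    ∀ (row : List String) (s t : Int) (S : PySem.Set String),
    ((PySem.List.enumerate row s).foldl
        (fun st p =>
          if PySem.Set.contains st.2 p.2 then st
          else (st.1 + (6 - p.1) * (w.insert k (w.getD k 0 + pref)).getD p.2 0, PySem.Set.add st.2 p.2))
        (t, S)).1
      = ((PySem.List.enumerate row s).foldl
          (fun st p =>
            if PySem.Set.contains st.2 p.2 then st
            else (st.1 + (6 - p.1) * w.getD p.2 0, PySem.Set.add st.2 p.2))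
          (t, S)).1
        + (if k ∈ row ∧ k ∉ S then
            (6 - (s + (((PySem.List.index? row k).getD 0 : Nat) : Int))) * pref
          else 0) := by
  intro row
  induction row with
  | nil => intro s t S; simp [PySem.List.enumerate_nil]
  | cons x r ih =>
    intro s t S
    rw [PySem.List.enumerate_cons]
    simp only [List.foldl_cons]
    by_cases hx : PySem.Set.contains S x = true
    · rw [if_pos hx, if_pos hx, ih (s+1)]
      have hxS : x ∈ S := (PySem.Set.contains_iff S x).mp hx
      by_cases hk : k ∈ x :: r ∧ k ∉ S
      · have hkx : k ≠ x := fun he => hk.2 (he ▸ hxS)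
        have hkr : k ∈ r := by
          rcases List.mem_cons.mp hk.1 with h | h
          · exact absurd h hkx
          · exact h
        rw [if_pos ⟨hkr, hk.2⟩, if_pos hk,
          PySem.List.index?_cons_of_ne _ (Ne.symm hkx)]
        rcases hio : PySem.List.index? r k with _ | n
        · rw [PySem.List.index?_eq_none_iff] at hio; exact absurd hkr hio
        · simp only [Option.map_some, Option.getD_some]
          push_cast
          ring
      · rw [if_neg hk, if_neg (fun h => hk ⟨List.mem_cons_of_mem x h.1, h.2⟩)]
    · rw [if_neg hx, if_neg hx]
      have hxS : x ∉ S := fun h => hx ((PySem.Set.contains_iff S x).mpr h)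
      by_cases hkx : k = x
      · subst hkx
        rw [PySem.Dict.getD_insert_self, ih (s+1),
          if_neg (fun h => h.2 ((PySem.Set.mem_add S k k).mpr (Or.inr rfl))),
          if_pos ⟨List.mem_cons_self, hxS⟩,
          PySem.List.index?_cons_self]
        have hre : t + (6 - s) * (w.getD k 0 + pref)
            = (t + (6 - s) * w.getD k 0) + (6 - s) * pref := by ring
        rw [hre, scoreB_fold_shift w r (s+1)]
        simp only [Option.getD_some, Nat.cast_zero]
        ring
      · rw [PySem.Dict.getD_insert_of_ne _ _ _ (Ne.symm hkx), ih (s+1)]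
        have haddiff : (k ∈ PySem.Set.add S x) ↔ (k ∈ S) := by
          rw [PySem.Set.mem_add]
          exact ⟨fun h => h.elim id (fun h => absurd h hkx), Or.inl⟩
        by_cases hk : k ∈ r ∧ k ∉ S
        · rw [if_pos ⟨hk.1, fun h => hk.2 (haddiff.mp h)⟩,
            if_pos ⟨List.mem_cons_of_mem x hk.1, hk.2⟩,
            PySem.List.index?_cons_of_ne _ (Ne.symm hkx)]
          rcases hio : PySem.List.index? r k with _ | n
          · rw [PySem.List.index?_eq_none_iff] at hio; exact absurd hk.1 hio
          · simp only [Option.map_some, Option.getD_some]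
            push_cast
            ring
        · rw [if_neg (fun h => hk ⟨h.1, fun hs => h.2 (haddiff.mpr hs)⟩)]
          have hcond : ¬ (k ∈ x :: r ∧ k ∉ S) := by
            intro h
            rcases List.mem_cons.mp h.1 with he | he
            · exact hkx he
            · exact hk ⟨he, h.2⟩
          rw [if_neg hcond]

-- with an all-zero weight map the fold only carries the accumulator
theorem scoreB_fold_empty :
    ∀ (row : List String) (s t : Int) (S : PySem.Set String),
    ((PySem.List.enumerate row s).foldl
        (fun st p =>
          if PySem.Set.contains st.2 p.2 then st
          else (st.1 + (6 - p.1) * (PySem.Dict.empty : PySem.Dict String Int).getD p.2 0, PySem.Set.add st.2 p.2))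
        (t, S)).1 = t := by
  intro row
  induction row with
  | nil => intro s t S; simp [PySem.List.enumerate_nil]
  | cons x r ih =>
    intro s t S
    rw [PySem.List.enumerate_cons]
    simp only [List.foldl_cons]
    by_cases hx : PySem.Set.contains S x = true
    · rw [if_pos hx]; exact ih (s+1) t S
    · rw [if_neg hx,
        show t + (6 - s) * (PySem.Dict.empty : PySem.Dict String Int).getD x 0 = t from by
          simp [PySem.Dict.getD_empty]]
      exact ih (s+1) t (PySem.Set.add S x)

-- the two scoring loops agree
theorem score_eq (row : List String) (languages : List String) (preference : List Int) :
    solScoreB (solWeight languages preference) row = solScoreA row languages preference := by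
  rw [solScoreB, solScoreA, solWeight]
  generalize languages.zip preference = L
  induction L using List.reverseRecOn with
  | nil =>
    simpa using scoreB_fold_empty row 0 0 PySem.Set.empty
  | append_singleton L p ihL =>
    rw [List.foldl_append, List.foldl_append]
    simp only [List.foldl_cons, List.foldl_nil]
    rw [scoreB_fold_insert_add, ihL]
    by_cases hp : p.1 ∈ row
    · simp [hp, PySem.Set.empty]
    · simp [hp]

-- B's running best: characterisation of the fold over (score, name) pairs
def bestStep (best : Option (Int × String)) (p : Int × String) : Option (Int × String) :=
  match best with
  | none => some p
  | some b => if b.1 < p.1 ∨ (p.1 = b.1 ∧ p.2 < b.2) then some p else some b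

theorem bestFold_decomp :
    ∀ (xs : List (Int × String)) (b : Int × String),
    ∃ res, xs.foldl bestStep (some b) = some res
      ∧ (res = b ∨ res ∈ xs)
      ∧ (∀ p, p = b ∨ p ∈ xs → p.1 ≤ res.1 ∧ (p.1 = res.1 → res.2 ≤ p.2)) := by
  intro xs
  induction xs with
  | nil =>
    intro b
    exact ⟨b, rfl, Or.inl rfl, fun p hp => by
      rcases hp with rfl | h
      · exact ⟨le_refl _, fun _ => le_refl _⟩
      · simp at h⟩
  | cons x t ih =>
    intro b
    simp only [List.foldl_cons, bestStep]
    by_cases hcond : b.1 < x.1 ∨ (x.1 = b.1 ∧ x.2 < b.2)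
    · rw [if_pos hcond]
      rcases ih x with ⟨res, hfold, hmem, hgood⟩
      refine ⟨res, hfold, ?_, ?_⟩
      · rcases hmem with rfl | h
        · exact Or.inr (List.mem_cons_self)
        · exact Or.inr (List.mem_cons_of_mem x h)
      · intro p hp
        rcases hp with rfl | hpx
        · -- p = b: compare via x
          have hx := hgood x (Or.inl rfl)
          rcases hcond with hlt | ⟨heq, hname⟩
          · refine ⟨le_trans (le_of_lt hlt) hx.1, fun he => absurd (lt_of_lt_of_le hlt hx.1) (by rw [he]; exact lt_irrefl _)⟩
          · refine ⟨heq ▸ hx.1, fun he => ?_⟩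
            have hxr : x.1 = res.1 := by omega
            exact le_trans (hx.2 hxr) (le_of_lt hname)
        · rcases List.mem_cons.mp hpx with rfl | h
          · exact hgood p (Or.inl rfl)
          · exact hgood p (Or.inr h)
    · rw [if_neg hcond]
      rcases ih b with ⟨res, hfold, hmem, hgood⟩
      refine ⟨res, hfold, ?_, ?_⟩
      · rcases hmem with rfl | h
        · exact Or.inl rfl
        · exact Or.inr (List.mem_cons_of_mem x h)
      · intro p hp
        rcases hp with rfl | hpx
        · exact hgood p (Or.inl rfl)
        · rcases List.mem_cons.mp hpx with rfl | h
          · -- p = x, beaten by b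
            push Not at hcond
            have hb := hgood b (Or.inl rfl)
            refine ⟨le_trans hcond.1 hb.1, fun he => ?_⟩
            have hpb : p.1 = b.1 := le_antisymm hcond.1 (by omega)
            exact le_trans (hb.2 (by omega)) (hcond.2 hpb)
          · exact hgood p (Or.inr h)

-- the main equivalence
theorem solution_eq_alt (table : List String) (languages : List String) (preference : List Int)
    (hpre : table ≠ [] ∧ ∀ t ∈ table, PySem.Str.split₀ t ≠ []) :
    solution table languages preference = solution_alt table languages preference := by
  rcases hpre with ⟨htne, -⟩
  set s : List String → Int := fun r => solScoreA r languages preference with hsdef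
  set key : List String → String := fun x => PySem.List.pyGetD x 0 "" with hkeydef
  set rowsB := table.map (fun t => PySem.Str.split₀ t) with hrowsB
  set l := PySem.List.sorted rowsB key false with hldef
  have hl : l ≠ [] := by
    rw [hldef, Ne, PySem.List.sorted_eq_nil_iff, List.map_eq_nil_iff]
    exact htne
  -- B's fold as a fold of bestStep over (score, name) pairs of the unsorted rows
  have hBfold : solution_alt table languages preference
      = (((rowsB.map (fun r => (s r, key r))).foldl bestStep none).map Prod.snd).getD "" := by
    rw [solution_alt]
    have hfun : (fun r => (s r, key r))
        = (fun r => (solScoreB (solWeight languages preference) r,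
            PySem.List.pyGetD r 0 "")) := by
      funext r
      rw [hsdef, hkeydef]
      simp only
      rw [score_eq]
    rw [hfun, hrowsB, List.map_map, List.foldl_map]
    rfl
  -- decompose B's fold
  rcases hr0 : rowsB with _ | ⟨r0, rest⟩
  · exact absurd (by simpa [hrowsB] using congrArg List.length hr0) (by simpa using htne)
  rcases bestFold_decomp (rest.map (fun r => (s r, key r))) (s r0, key r0) with
    ⟨res, hfold, hresmem, hgood⟩
  have hBval : solution_alt table languages preference = res.2 := by
    rw [hBfold, hr0]
    simp only [List.map_cons, List.foldl_cons, bestStep, hfold]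
    rfl
  -- res is attained by some row, and is optimal for every row
  have hres_row : ∃ wr, wr ∈ rowsB ∧ s wr = res.1 ∧ key wr = res.2 := by
    rcases hresmem with he | hm
    · exact ⟨r0, by rw [hr0]; exact List.mem_cons_self, by rw [he], by rw [he]⟩
    · rcases List.mem_map.mp hm with ⟨wr, hwr, he⟩
      exact ⟨wr, by rw [hr0]; exact List.mem_cons_of_mem r0 hwr, by rw [← he], by rw [← he]⟩
  have hres_opt : ∀ wr ∈ rowsB, s wr ≤ res.1 ∧ (s wr = res.1 → res.2 ≤ key wr) := by
    intro wr hwr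
    rw [hr0] at hwr
    rcases List.mem_cons.mp hwr with he | hm
    · exact hgood (s wr, key wr) (Or.inl (by rw [he]))
    · exact hgood (s wr, key wr) (Or.inr (List.mem_map.mpr ⟨wr, hm, rfl⟩))
  -- A's answer list is l.map s
  have hanswer : (PySem.List.pyRange 0 (l.length : Int) 1).map
      (fun j => solScoreA (PySem.List.pyGetD l j []) languages preference) = l.map s := by
    conv_rhs => rw [← PySem.List.map_pyGetD_pyRange_zero' l []]
    rw [List.map_map]
    rfl
  -- the maximum of the answer list
  have hvne : l.map s ≠ [] := by simpa using hl
  rcases hv : PySem.List.max? (l.map s) (fun x => x) with _ | v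
  · rw [PySem.List.max?_eq_none_iff] at hv; exact absurd hv hvne
  have hvmax : ∀ y ∈ l.map s, y ≤ v := by
    intro y hy
    simpa using PySem.List.max?_isMax hv y hy
  -- first index attaining the maximum
  rcases hidx : PySem.List.index? (l.map s) v with _ | kidx
  · rw [PySem.List.index?_eq_none_iff] at hidx
    exact absurd (PySem.List.max?_mem hv) hidx
  rcases PySem.List.getElem_of_index?_eq_some hidx with ⟨hklt, hkv, hkfirst⟩
  have hklen : kidx < l.length := by simpa using hklt
  -- A's result is key l[kidx]
  have hAval : solution table languages preference = key l[kidx] := by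
    rw [solution]
    simp only [← hrowsB, ← hkeydef, ← hldef, hanswer, hv, Option.getD_some, hidx]
    have hitems : (((PySem.List.pyRange 0 (l.length : Int) 1).map
          (fun n => (n, PySem.List.pyGetD (PySem.List.pyGetD l n []) 0 ""))).foldl
        (fun d p => d.insert p.1 p.2) PySem.Dict.empty).items
        = (PySem.List.pyRange 0 (l.length : Int) 1).map
          (fun n => (n, PySem.List.pyGetD (PySem.List.pyGetD l n []) 0 "")) := by
      rw [PySem.Dict.items_foldl_insert_fresh _ Prod.fst Prod.snd _
        (fun a _ => PySem.Dict.contains_empty _)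
        (by rw [List.map_map]
            exact List.Nodup.map (fun _ _ h => h)
              (PySem.List.nodup_pyRange_one 0 ((l.length : Int))))]
      simp only [List.map_map]
      rfl
    have hnodup : (((PySem.List.pyRange 0 (l.length : Int) 1).map
          (fun n => (n, PySem.List.pyGetD (PySem.List.pyGetD l n []) 0 ""))).foldl
        (fun d p => d.insert p.1 p.2) PySem.Dict.empty).keys.Nodup := by
      show (_ : PySem.Dict Int String).keys.Nodup
      simp only [PySem.Dict.keys, hitems, List.map_map]
      exact List.Nodup.map (fun _ _ h => h) (PySem.List.nodup_pyRange_one 0 ((l.length : Int)))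
    have hrowk : PySem.List.pyGetD l ((kidx : Nat) : Int) [] = l[kidx] := by
      rw [PySem.List.pyGetD_natCast]
      simp [List.getD, hklen]
    rw [PySem.Dict.getD_of_mem_items _
      (v := PySem.List.pyGetD (PySem.List.pyGetD l ((kidx : Nat) : Int) []) 0 "") ?_ hnodup]
    · rw [hrowk]
    · rw [hitems]
      exact List.mem_map.mpr ⟨((kidx : Nat) : Int),
        PySem.List.mem_pyRange_one.mpr ⟨by positivity, by exact_mod_cast hklen⟩, rfl⟩
  -- s l[kidx] = v
  have hsk : s l[kidx] = v := by
    have := hkv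
    simpa using this
  -- the two maxima agree
  have hmemk : l[kidx] ∈ rowsB :=
    (PySem.List.mem_sorted rowsB key false _).mp (List.getElem_mem hklen)
  have hveq : v = res.1 := by
    apply le_antisymm
    · rw [← hsk]; exact (hres_opt _ hmemk).1
    · rcases hres_row with ⟨wr, hwr, hs, -⟩
      rw [← hs]
      exact hvmax _ (List.mem_map.mpr ⟨wr, by rw [hldef, PySem.List.mem_sorted]; exact hwr, rfl⟩)
  -- names agree
  have hname : key l[kidx] = res.2 := by
    rcases hres_row with ⟨wr, hwr, hs, hk⟩
    have hwl : wr ∈ l := by rw [hldef, PySem.List.mem_sorted]; exact hwr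
    rcases List.mem_iff_getElem.mp hwl with ⟨j, hj, hje⟩
    apply le_antisymm
    · -- kidx ≤ j since s l[j] = v and everything before kidx misses v
      have hsj : (l.map s)[j]'(by simpa using hj) = v := by
        rw [← hveq] at hs
        simp [hje, hs]
      have hkj : kidx ≤ j := by
        by_contra hlt
        exact hkfirst j (by omega) hsj
      rw [← hk, ← hje]
      exact PySem.List.key_sorted_getElem_mono rowsB key hkj hj
    · have := (hres_opt _ hmemk).2 (by rw [hsk, hveq])
      exact this
  rw [hAval, hBval, hname]

-- ===== VERDICT (by name: the statement is the Claim_ definition above) =====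
theorem solution_spec : Claim_equal_solution := by
  intro table languages preference _ hpre
  exact solution_eq_alt table languages preference hpre
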